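-- pv_equiv track=rewrite | github.com/sgg10/curso_intermedio_python | Hangman/Game.py | configureWord
-- ===== SOURCE A (Python) =====
-- def configureWord(word):
--   hide_word = ["_" for _ in range(len(word))]
--   index = { i:[] for i in word }
--   for key in index.keys():
--     for i in range(len(word)):
--       if key == word[i]:
--         index[key].append(i)
--   return hide_word, index
-- ===== SOURCE B (Python) =====
-- def configureWord(word):
--     hide_word = []
--     index = {}
--     for i, ch in enumerate(word):
--         hide_word.append("_")
--         index.setdefault(ch, []).append(i)
--     return hide_word, index
-- ===== Notes on version B (the rewrite author's own statement) =====
-- stated objective: faster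
-- what changed: Replaces A's dict-comprehension plus a rescan of the whole word for every distinct character with a single enumerate pass that setdefault-appends each index to its character's list.
import Mathlib
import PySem

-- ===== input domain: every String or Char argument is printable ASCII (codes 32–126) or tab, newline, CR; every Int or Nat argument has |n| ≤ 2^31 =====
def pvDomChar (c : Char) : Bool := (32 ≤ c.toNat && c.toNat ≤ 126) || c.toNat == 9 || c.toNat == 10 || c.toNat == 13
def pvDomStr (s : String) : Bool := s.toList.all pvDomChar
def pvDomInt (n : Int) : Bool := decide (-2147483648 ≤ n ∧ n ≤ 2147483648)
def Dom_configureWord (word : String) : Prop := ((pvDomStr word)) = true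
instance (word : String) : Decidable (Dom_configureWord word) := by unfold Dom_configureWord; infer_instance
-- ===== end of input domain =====

-- B replaces A's per-distinct-character rescans of the word by one enumerate pass that appends each
-- index to its character's list (setdefault), changing O(k·n) to O(n); return value only, no mutation.

-- ===== PORT A =====
-- iterating a Python string yields single-character strings; word[i] is that same string
def configureWord (word : String) : List String × (List (String × List Int)) :=
  let w : List String := word.toList.map (fun c => String.ofList [c])
  -- hide_word = ["_" for _ in range(len(word))]
  let hideWord : List String := (PySem.List.pyRange 0 (PySem.List.len w) 1).map (fun _ => "_")
  -- index = { i:[] for i in word }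
  let index0 : PySem.Dict String (List Int) :=
    w.foldl (fun d c => d.insert c []) PySem.Dict.empty
  -- for key in index.keys(): for i in range(len(word)): if key == word[i]: index[key].append(i)
  let index : PySem.Dict String (List Int) :=
    index0.keys.foldl (fun d key =>
      (PySem.List.pyRange 0 (PySem.List.len w) 1).foldl (fun d i =>
        if key == PySem.List.pyGetD w i "" then d.modify key [] (fun xs => xs ++ [i]) else d) d)
      index0
  (hideWord, index.items)

-- ===== PORT B =====
-- index.setdefault(ch, []).append(i) sets index[ch] = index.get(ch, []) + [i] (a new key appends at the end) = Dict.modify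
def configureWord_alt (word : String) : List String × (List (String × List Int)) :=
  let w : List String := word.toList.map (fun c => String.ofList [c])
  let st :=
    (PySem.List.enumerate w).foldl
      (fun (st : List String × PySem.Dict String (List Int)) p =>
        (st.1 ++ ["_"], st.2.modify p.2 [] (fun xs => xs ++ [p.1])))
      ([], PySem.Dict.empty)
  (st.1, st.2.items)

-- ===== PRECONDITION & SPEC =====
def Spec_configureWord (word : String) (out : List String × (List (String × List Int))) : Prop := out = configureWord_alt word
instance (word : String) (out : List String × (List (String × List Int))) : Decidable (Spec_configureWord word out) := by unfold Spec_configureWord; infer_instance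

-- ===== CLAIM (what is proved, stated in full; the proofs are below) =====
def Claim_equal_configureWord : Prop := ∀ (word : String), Dom_configureWord word → Spec_configureWord word (configureWord word)

-- ===== LEMMAS AND PROOFS =====

-- String BEq is symmetric
theorem pv_beq_comm (a b : String) : (a == b) = (b == a) := by
  rw [Bool.eq_iff_iff, beq_iff_eq, beq_iff_eq]; exact eq_comm

-- the dict comprehension { i:[] for i in word } maps every key to []
theorem pv_getD_init (l : List String) (d : PySem.Dict String (List Int)) (k : String)
    (h : d.getD k [] = []) :
    (l.foldl (fun d c => d.insert c ([] : List Int)) d).getD k [] = [] := by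
  induction l generalizing d with
  | nil => exact h
  | cons c t ih =>
    simp only [List.foldl_cons]
    exact ih _ (by rw [PySem.Dict.getD_insert]; split_ifs <;> simp [h])

-- one inner pass of A for a fixed key: appends the matching indices to that key, touches nothing else
theorem pv_inner_getD (g : Int → String) (key k : String) (l : List Int)
    (d : PySem.Dict String (List Int)) :
    (l.foldl (fun d i => if key == g i then d.modify key [] (fun xs => xs ++ [i]) else d) d).getD k []
      = if k = key then d.getD key [] ++ l.filter (fun i => key == g i) else d.getD k [] := by
  induction l generalizing d with
  | nil => split_ifs with h <;> simp [h]
  | cons i t ih =>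
    simp only [List.foldl_cons, List.filter_cons]
    by_cases hk : k = key
    · subst hk
      by_cases hg : (k == g i) = true
      · rw [if_pos hg, ih]
        simp [hg, PySem.Dict.getD_modify_self]
      · rw [if_neg hg, ih]
        simp [hg]
    · by_cases hg : (key == g i) = true
      · rw [if_pos hg, ih]
        simp [hk, PySem.Dict.getD_modify]
      · rw [if_neg hg, ih]
        simp [hk]

-- one inner pass of A never changes the key set (the key is already present)
theorem pv_inner_keys (g : Int → String) (key : String) (l : List Int)
    (d : PySem.Dict String (List Int)) (hk : key ∈ d.keys) :
    (l.foldl (fun d i => if key == g i then d.modify key [] (fun xs => xs ++ [i]) else d) d).keys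
      = d.keys := by
  induction l generalizing d with
  | nil => rfl
  | cons i t ih =>
    simp only [List.foldl_cons]
    by_cases hg : (key == g i) = true
    · rw [if_pos hg]
      have hc : d.contains key = true := (PySem.Dict.contains_iff_mem_keys d key).mpr hk
      have hkeys : (d.modify key [] (fun xs => xs ++ [i])).keys = d.keys := by
        rw [PySem.Dict.keys_modify, PySem.Dict.keys_insert_of_contains _ _ hc]
      rw [ih _ (by rw [hkeys]; exact hk), hkeys]
    · rw [if_neg hg]; exact ih d hk

-- A's outer loop over the (distinct) keys: key set preserved, every listed key gets its index list
theorem pv_outer (g : Int → String) (rng : List Int) (ks : List String)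
    (d : PySem.Dict String (List Int)) (hnd : ks.Nodup) (hks : ∀ x ∈ ks, x ∈ d.keys) :
    (ks.foldl (fun d key =>
        rng.foldl (fun d i => if key == g i then d.modify key [] (fun xs => xs ++ [i]) else d) d)
      d).keys = d.keys ∧
    ∀ k, (ks.foldl (fun d key =>
        rng.foldl (fun d i => if key == g i then d.modify key [] (fun xs => xs ++ [i]) else d) d)
      d).getD k []
        = if k ∈ ks then d.getD k [] ++ rng.filter (fun i => k == g i) else d.getD k [] := by
  induction ks generalizing d with
  | nil => exact ⟨rfl, fun k => by simp⟩
  | cons key t ih =>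
    have hkmem : key ∈ d.keys := hks key (by simp)
    have hkeys' := pv_inner_keys g key rng d hkmem
    have hnd' : t.Nodup := hnd.of_cons
    have hknot : key ∉ t := (List.nodup_cons.mp hnd).1
    have hks' : ∀ x ∈ t, x ∈ (rng.foldl (fun d i =>
        if key == g i then d.modify key [] (fun xs => xs ++ [i]) else d) d).keys := by
      intro x hx; rw [hkeys']; exact hks x (List.mem_cons_of_mem _ hx)
    obtain ⟨ihkeys, ihgetD⟩ := ih _ hnd' hks'
    simp only [List.foldl_cons]
    refine ⟨by rw [ihkeys, hkeys'], fun k => ?_⟩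
    rw [ihgetD k, pv_inner_getD]
    by_cases hkt : k ∈ t
    · have hne : k ≠ key := fun h => hknot (h ▸ hkt)
      simp [hkt, hne]
    · by_cases hkk : k = key
      · subst hkk; simp [hknot]
      · simp [hkt, hkk]

-- B's grouped pairs, unswapped, are A's filtered range
theorem pv_filter_swap (w : List String) (k : String) (l : List Int) :
    List.map (fun q => q.2) (List.filter (fun q => q.1 == k)
        (l.map (fun j => (PySem.List.pyGetD w j "", j))))
      = l.filter (fun i => k == PySem.List.pyGetD w i "") := by
  induction l with
  | nil => rfl
  | cons i t ih =>
    simp only [List.map_cons, List.filter_cons]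
    by_cases h : (k == PySem.List.pyGetD w i "") = true
    · have h' : (PySem.List.pyGetD w i "" == k) = true := by rw [pv_beq_comm]; exact h
      simp [h, h', ih]
    · have h' : (PySem.List.pyGetD w i "" == k) = false := by
        rw [pv_beq_comm]; simpa using h
      simp [h, h', ih]

theorem configureWord_eq (word : String) : configureWord word = configureWord_alt word := by
  simp only [configureWord, configureWord_alt]
  set w : List String := word.toList.map (fun c => String.ofList [c]) with hw
  rw [PySem.List.foldl_prod_mk (fun (a : List String) (p : Int × String) => a ++ ["_"])
    (fun (b : PySem.Dict String (List Int)) (p : Int × String) =>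
      b.modify p.2 [] (fun xs => xs ++ [p.1]))]
  refine Prod.ext ?_ ?_
  · -- hide_word: both are w.length copies of "_"
    show (PySem.List.pyRange 0 (PySem.List.len w) 1).map (fun _ => "_")
        = (PySem.List.enumerate w).foldl (fun acc _ => acc ++ ["_"]) []
    rw [show (PySem.List.enumerate w).foldl
          (fun (acc : List String) (_ : Int × String) => acc ++ ["_"]) []
        = [] ++ (PySem.List.enumerate w).map (fun _ => "_") from
      PySem.List.foldl_append_singleton_eq_map _ _ _]
    rw [PySem.List.len_eq, PySem.List.pyRange_zero_natCast]
    simp [Function.comp_def, List.map_const', PySem.List.length_enumerate]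
  · -- index: compare the two item lists
    show (((w.foldl (fun d c => d.insert c []) PySem.Dict.empty).keys).foldl (fun d key =>
        (PySem.List.pyRange 0 (PySem.List.len w) 1).foldl (fun d i =>
          if key == PySem.List.pyGetD w i "" then d.modify key [] (fun xs => xs ++ [i]) else d) d)
        (w.foldl (fun d c => d.insert c []) PySem.Dict.empty)).items
      = ((PySem.List.enumerate w).foldl
          (fun (d : PySem.Dict String (List Int)) p => d.modify p.2 [] (fun xs => xs ++ [p.1]))
          PySem.Dict.empty).items
    set rng : List Int := PySem.List.pyRange 0 (PySem.List.len w) 1 with hrng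
    set d0 : PySem.Dict String (List Int) := w.foldl (fun d c => d.insert c []) PySem.Dict.empty
      with hd0
    -- key set of A's comprehension dict
    have hkeys0 : d0.keys = PySem.Set.ofList w := by
      rw [hd0]
      have h := PySem.Dict.keys_foldl_insert (ν := List Int) w (fun _ _ => []) PySem.Dict.empty
      rw [PySem.Dict.keys_empty, PySem.Set.update_nil_left] at h
      exact h
    have hnd0 : d0.keys.Nodup := by rw [hkeys0]; exact PySem.Set.nodup_ofList w
    have hgetD0 : ∀ k, d0.getD k [] = [] := fun k =>
      pv_getD_init w PySem.Dict.empty k (PySem.Dict.getD_empty k [])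
    obtain ⟨hAkeys, hAgetD⟩ := pv_outer (fun i => PySem.List.pyGetD w i "") rng d0.keys d0 hnd0
      (fun x hx => hx)
    -- B's dict: fold over the swapped enumerate pairs
    set dB : PySem.Dict String (List Int) := (PySem.List.enumerate w).foldl
        (fun d p => d.modify p.2 [] (fun xs => xs ++ [p.1])) PySem.Dict.empty with hdB
    have hBkeys : dB.keys = PySem.Set.ofList w := by
      rw [hdB]
      have h := PySem.Dict.keys_foldl_modify_key (PySem.List.enumerate w) (fun p => p.2) []
        (fun _ p v => v ++ [p.1]) PySem.Dict.empty
      rw [PySem.Dict.keys_empty, PySem.Set.update_nil_left, PySem.List.map_snd_enumerate] at h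
      exact h
    have hBnd : dB.keys.Nodup := by rw [hBkeys]; exact PySem.Set.nodup_ofList w
    have hBgetD : ∀ k, dB.getD k [] = rng.filter (fun i => k == PySem.List.pyGetD w i "") := by
      intro k
      have hswap : dB = (((PySem.List.enumerate w).map (fun p => (p.2, p.1))).foldl
          (fun d q => d.modify q.1 [] (fun xs => xs ++ [q.2])) PySem.Dict.empty) := by
        rw [hdB]
        exact (List.foldl_map (f := fun p : Int × String => (p.2, p.1))
          (g := fun d q => d.modify q.1 [] (fun xs => xs ++ [q.2]))
          (l := PySem.List.enumerate w) (init := PySem.Dict.empty)).symm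
      rw [hswap, PySem.Dict.getD_foldl_modify_append, PySem.Dict.getD_empty,
        PySem.List.enumerate_eq_map_pyRange w "", List.nil_append, List.map_map]
      exact pv_filter_swap w k rng
    -- both item lists are the key list paired with the per-key index lists
    rw [PySem.Dict.items_eq_map_keys _ (by rw [hAkeys]; exact hnd0) [],
      PySem.Dict.items_eq_map_keys _ hBnd [], hAkeys,
      show dB.keys = d0.keys from hBkeys.trans hkeys0.symm]
    refine List.map_congr_left ?_
    intro k hk
    rw [hAgetD k, hBgetD k]
    simp [hk, hgetD0 k]

-- ===== VERDICT (by name: the statement is the Claim_ definition above) =====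
theorem configureWord_spec : Claim_equal_configureWord := by
  intro word _
  unfold Spec_configureWord
  exact configureWord_eq word
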